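-- pv_equiv track=rewrite | github.com/paiml/depyler | examples/hard_misc_version_compare.py | parse_patch
-- ===== SOURCE A (Python) =====
-- def parse_patch(version: str) -> int:
--     n: int = len(version)
--     i: int = 0
--     dots: int = 0
--     while i < n:
--         if version[i] == ".":
--             dots = dots + 1
--             if dots == 2:
--                 i = i + 1
--                 result: int = 0
--                 while i < n:
--                     ch: str = version[i]
--                     result = result * 10 + ord(ch) - 48
--                     i = i + 1
--                 return result
--         i = i + 1
--     return 0
-- ===== SOURCE B (Python) =====
-- def parse_patch(version: str) -> int:
--     def after_dot(s):
--         # tail after the first "." of s, or None if s has no dot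
--         for i, ch in enumerate(s):
--             if ch == ".":
--                 return s[i + 1:]
--         return None
--     rest = after_dot(version)
--     tail = after_dot(rest) if rest is not None else None
--     if tail is None:
--         return 0
--     result = 0
--     for ch in tail:
--         result = result * 10 + ord(ch) - 48
--     return result
-- ===== Notes on version B (the rewrite author's own statement) =====
-- stated objective: simpler
-- what changed: Replaces A's single interleaved index-and-dot-counting scan with a two-phase decomposition: a helper locates the tail after each of the first two dots (slicing, no index state or dot counter), and a separate fold turns that tail into the number.
import Mathlib
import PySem

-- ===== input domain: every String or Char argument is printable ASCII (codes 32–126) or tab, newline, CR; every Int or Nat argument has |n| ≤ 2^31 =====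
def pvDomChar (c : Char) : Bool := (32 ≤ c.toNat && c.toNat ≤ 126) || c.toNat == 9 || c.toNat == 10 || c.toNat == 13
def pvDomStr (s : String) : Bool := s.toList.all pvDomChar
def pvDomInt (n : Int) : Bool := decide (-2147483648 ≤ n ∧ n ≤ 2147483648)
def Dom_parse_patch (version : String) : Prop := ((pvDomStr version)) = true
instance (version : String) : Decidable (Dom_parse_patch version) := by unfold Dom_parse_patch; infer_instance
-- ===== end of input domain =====

-- B replaces A's interleaved dot-counting scan with a locate-then-fold decomposition (same cost, simpler).

-- ===== PORT A =====
-- inner while: result = result * 10 + ord(ch) - 48 over the remaining characters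
def parsePatchInner : List Char → Int → Int
  | [], result => result
  | ch :: rest, result => parsePatchInner rest (result * 10 + (ch.toNat : Int) - 48)

-- outer while with the dots counter; on the second dot it switches to the inner loop
def parsePatchScan : List Char → Int → Int
  | [], _ => 0
  | c :: rest, dots =>
    if c = '.' then
      if dots + 1 = 2 then parsePatchInner rest 0
      else parsePatchScan rest (dots + 1)
    else parsePatchScan rest dots

def parse_patch (version : String) : Int := parsePatchScan version.toList 0

-- ===== PORT B =====
-- after_dot: the tail after the first "." of s, or none if s has no dot
def afterDot : List Char → Option (List Char)
  | [] => none
  | c :: rest => if c = '.' then some rest else afterDot rest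

def parse_patch_alt (version : String) : Int :=
  match (afterDot version.toList).bind afterDot with
  | none => 0
  | some tail => tail.foldl (fun result ch => result * 10 + (ch.toNat : Int) - 48) 0

-- ===== PRECONDITION & SPEC =====
def Spec_parse_patch (version : String) (out : Int) : Prop := out = parse_patch_alt version
instance (version : String) (out : Int) : Decidable (Spec_parse_patch version out) := by unfold Spec_parse_patch; infer_instance

-- ===== CLAIM (what is proved, stated in full; the proofs are below) =====
def Claim_equal_parse_patch : Prop := ∀ (version : String), Dom_parse_patch version → Spec_parse_patch version (parse_patch version)

-- ===== LEMMAS AND PROOFS =====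

theorem inner_eq_foldl (cs : List Char) (acc : Int) :
    parsePatchInner cs acc = cs.foldl (fun result ch => result * 10 + (ch.toNat : Int) - 48) acc := by
  induction cs generalizing acc with
  | nil => rfl
  | cons c rest ih => simp [parsePatchInner, List.foldl, ih]

theorem scan_one (cs : List Char) :
    parsePatchScan cs 1 =
      match afterDot cs with
      | none => 0
      | some tail => parsePatchInner tail 0 := by
  induction cs with
  | nil => rfl
  | cons c rest ih =>
    by_cases h : c = '.'
    · simp [parsePatchScan, afterDot, h]
    · simp [parsePatchScan, afterDot, h, ih]

theorem scan_zero (cs : List Char) :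
    parsePatchScan cs 0 =
      match afterDot cs with
      | none => 0
      | some rest => parsePatchScan rest 1 := by
  induction cs with
  | nil => rfl
  | cons c rest ih =>
    by_cases h : c = '.'
    · simp [parsePatchScan, afterDot, h]
    · simp [parsePatchScan, afterDot, h, ih]

-- ===== VERDICT (by name: the statement is the Claim_ definition above) =====
theorem parse_patch_spec : Claim_equal_parse_patch := by
  intro version _
  unfold Spec_parse_patch parse_patch parse_patch_alt
  rw [scan_zero]
  cases h1 : afterDot version.toList with
  | none => simp
  | some rest =>
    simp only [Option.bind_some]
    rw [scan_one]
    cases h2 : afterDot rest with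
    | none => simp
    | some tail => simp [inner_eq_foldl]
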